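-- pv_equiv track=rewrite | github.com/CMS-ETROC/ETROC-Analysis | TestBeam/condor_at_lxplus/decoding.py | build_events_sequentially
-- ===== SOURCE A (Python) =====
-- def build_events_sequentially(unpacked_data):
--     """
--     Builds events by processing the data stream sequentially. An event is defined
--     by a consistent BCID. The event number increments only when the BCID of a new,
--     complete packet changes from the previous one.
--
--     Args:
--         unpacked_data (iterable): An iterable that yields tuples of
--                                   (record_type, record_data).
--
--     Returns:
--         dict: A dictionary of lists ready for conversion to a Pandas DataFrame.
--     """
--     df_data = {
--         'evt': [], 'bcid': [], 'l1a_counter': [], 'ea': [], 'row': [], 'col': [],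
--         'toa': [], 'tot': [], 'cal': [], 'elink': []
--     }
--
--     pending_packets = {}
--     # State variables for the new event counting logic
--     event_counter = -1
--     current_bcid = -1  # Sentinel value, assuming no real bcid is -1
--
--     for record_type, record_data in unpacked_data:
--         if not record_type or not record_data:
--             continue
--
--         elink = record_data.get('elink')
--         if elink is None:
--             continue
--
--         if record_type == 'header':
--             # Start a new packet for this elink
--             pending_packets[elink] = {'header': record_data, 'data': []}
--
--         elif record_type == 'data':
--             # Add data to an existing packet
--             if elink in pending_packets:
--                 pending_packets[elink]['data'].append(record_data)
--
--         elif record_type == 'trailer':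
--             # A packet is complete if it's in pending_packets and has data
--             if elink in pending_packets and len(pending_packets[elink]['data']) > 0:
--                 packet = pending_packets.pop(elink)
--                 packet_bcid = packet['header'].get('bcid')
--
--                 if packet_bcid is None:
--                     continue # Ignore packets with no bcid
--
--                 # ---- CORE EVENT COUNTING LOGIC ----
--                 # If the bcid of this valid packet is different from the
--                 # bcid of the last valid packet, increment the event counter.
--                 if packet_bcid != current_bcid:
--                     event_counter += 1
--                     current_bcid = packet_bcid
--                 # ------------------------------------
--
--                 l1a_for_event = packet['header'].get('l1counter')
--
--                 # Add all hits from this completed packet to the final dictionary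
--                 for data_hit in packet['data']:
--                     df_data['evt'].append(event_counter)
--                     df_data['bcid'].append(current_bcid)
--                     df_data['l1a_counter'].append(l1a_for_event)
--                     df_data['ea'].append(data_hit.get('ea'))
--                     df_data['row'].append(data_hit.get('row_id'))
--                     df_data['col'].append(data_hit.get('col_id'))
--                     df_data['toa'].append(data_hit.get('toa'))
--                     df_data['tot'].append(data_hit.get('tot'))
--                     df_data['cal'].append(data_hit.get('cal'))
--                     df_data['elink'].append(data_hit.get('elink'))
--
--             elif elink in pending_packets:
--                 # Discard packet that has a header but no data.
--                 del pending_packets[elink]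
--
--     return df_data
-- ===== SOURCE B (Python) =====
-- def build_events_sequentially(unpacked_data):
--     # Pass 1: run the header/data/trailer state machine and collect the
--     # completed valid packets (bcid, l1counter, hits) in trailer-completion order.
--     packets = []
--     pending = {}
--     for record_type, record_data in unpacked_data:
--         if not record_type or not record_data:
--             continue
--         elink = record_data.get('elink')
--         if elink is None:
--             continue
--         if record_type == 'header':
--             pending[elink] = (record_data, [])
--         elif record_type == 'data':
--             if elink in pending:
--                 pending[elink][1].append(record_data)
--         elif record_type == 'trailer':
--             if elink in pending:
--                 header, hits = pending.pop(elink)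
--                 bcid = header.get('bcid')
--                 if hits and bcid is not None:
--                     packets.append((bcid, header.get('l1counter'), hits))
--
--     # Pass 2: number the events and flatten the packets' hits into the columns.
--     df_data = {
--         'evt': [], 'bcid': [], 'l1a_counter': [], 'ea': [], 'row': [], 'col': [],
--         'toa': [], 'tot': [], 'cal': [], 'elink': []
--     }
--     event_counter = -1
--     current_bcid = -1
--     for bcid, l1a, hits in packets:
--         if bcid != current_bcid:
--             event_counter += 1
--             current_bcid = bcid
--         for data_hit in hits:
--             df_data['evt'].append(event_counter)
--             df_data['bcid'].append(current_bcid)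
--             df_data['l1a_counter'].append(l1a)
--             df_data['ea'].append(data_hit.get('ea'))
--             df_data['row'].append(data_hit.get('row_id'))
--             df_data['col'].append(data_hit.get('col_id'))
--             df_data['toa'].append(data_hit.get('toa'))
--             df_data['tot'].append(data_hit.get('tot'))
--             df_data['cal'].append(data_hit.get('cal'))
--             df_data['elink'].append(data_hit.get('elink'))
--     return df_data
-- ===== Notes on version B (the rewrite author's own statement) =====
-- stated objective: alternative
-- what changed: A's single loop that emits hits inline at trailer completion is split into two passes: pass 1 runs the packet state machine and collects completed valid packets (bcid, l1counter, hits) in completion order; pass 2 walks that list doing the event counting and flattening hits into the column dict.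
import Mathlib
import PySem

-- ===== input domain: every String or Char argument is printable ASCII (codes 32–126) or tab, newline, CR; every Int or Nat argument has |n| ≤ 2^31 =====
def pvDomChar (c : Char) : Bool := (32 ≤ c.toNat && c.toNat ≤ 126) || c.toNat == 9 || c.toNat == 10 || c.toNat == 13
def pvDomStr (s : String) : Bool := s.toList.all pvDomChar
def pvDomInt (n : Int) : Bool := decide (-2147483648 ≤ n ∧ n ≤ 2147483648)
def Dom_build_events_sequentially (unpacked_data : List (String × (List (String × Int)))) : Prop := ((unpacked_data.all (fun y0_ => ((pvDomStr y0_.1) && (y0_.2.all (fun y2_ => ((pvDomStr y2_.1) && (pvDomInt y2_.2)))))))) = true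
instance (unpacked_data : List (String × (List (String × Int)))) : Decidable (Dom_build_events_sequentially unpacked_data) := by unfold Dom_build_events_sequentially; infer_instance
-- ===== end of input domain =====

-- B re-groups A's single loop into two passes (collect completed packets, then number events and
-- flatten hits); same O(n) cost, objective: alternative decomposition. Equality is about the RETURN
-- value (A mutates nothing observable).

-- record_data arrives as an association list standing for a Python dict built from it (later keys
-- overwrite); .get(k) is get? on that dict.
def pvGetKey (rd : List (String × Int)) (k : String) : Option Int :=
  (PySem.Dict.ofList rd).get? k

-- df_data: a dict with ten FIXED literal keys, each holding a list — modelled as a structure.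
structure PvCols where
  evt : List Int
  bcid : List Int
  l1a : List Int
  ea : List Int
  row : List Int
  col : List Int
  toa : List Int
  tot : List Int
  cal : List Int
  elink : List Int
deriving Repr, DecidableEq

def PvCols.init : PvCols := ⟨[], [], [], [], [], [], [], [], [], []⟩

def PvCols.toOut (c : PvCols) : List (String × List Int) :=
  [("evt", c.evt), ("bcid", c.bcid), ("l1a_counter", c.l1a), ("ea", c.ea), ("row", c.row),
   ("col", c.col), ("toa", c.toa), ("tot", c.tot), ("cal", c.cal), ("elink", c.elink)]

-- A pending packet: (header record, list of data records).
def PvPending := PySem.Dict Int (List (String × Int) × List (List (String × Int)))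

-- ===== PORT A =====
-- the inner hit loop of A's trailer branch: the ten appends.
-- .get on hit fields / l1counter may be None in Python; those cells are rendered as 0
-- (identically in both ports; Python itself returns the identical dict on such inputs).
def pvEmitA (evt cur l1a : Int) (c : PvCols) (h : List (String × Int)) : PvCols :=
  { evt := c.evt ++ [evt], bcid := c.bcid ++ [cur], l1a := c.l1a ++ [l1a],
    ea := c.ea ++ [(pvGetKey h "ea").getD 0], row := c.row ++ [(pvGetKey h "row_id").getD 0],
    col := c.col ++ [(pvGetKey h "col_id").getD 0], toa := c.toa ++ [(pvGetKey h "toa").getD 0],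
    tot := c.tot ++ [(pvGetKey h "tot").getD 0], cal := c.cal ++ [(pvGetKey h "cal").getD 0],
    elink := c.elink ++ [(pvGetKey h "elink").getD 0] }

def pvLoopA (xs : List (String × List (String × Int))) (pend : PvPending)
    (evt cur : Int) (cols : PvCols) : PvCols :=
  match xs with
  | [] => cols
  | (rt, rd) :: rest =>
    if rt == "" || rd == [] then pvLoopA rest pend evt cur cols
    else
      match pvGetKey rd "elink" with
      | none => pvLoopA rest pend evt cur cols
      | some el =>
        if rt == "header" then
          pvLoopA rest (pend.insert el (rd, [])) evt cur cols
        else if rt == "data" then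
          pvLoopA rest
            (if pend.contains el then pend.modify el ([], []) (fun p => (p.1, p.2 ++ [rd])) else pend)
            evt cur cols
        else if rt == "trailer" then
          match pend.get? el with
          | some (hdr, hits) =>
            if hits.length > 0 then
              match pvGetKey hdr "bcid" with
              | none => pvLoopA rest (pend.erase el) evt cur cols
              | some b =>
                let evt' := if b != cur then evt + 1 else evt
                let cur' := if b != cur then b else cur
                let l1a := (pvGetKey hdr "l1counter").getD 0
                pvLoopA rest (pend.erase el) evt' cur'
                  (hits.foldl (pvEmitA evt' cur' l1a) cols)
            else
              pvLoopA rest (pend.erase el) evt cur cols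
          | none => pvLoopA rest pend evt cur cols
        else pvLoopA rest pend evt cur cols

def build_events_sequentially (unpacked_data : List (String × (List (String × Int)))) : List (String × List Int) :=
  (pvLoopA unpacked_data PySem.Dict.empty (-1) (-1) PvCols.init).toOut

-- ===== PORT B =====
-- Pass 1: the state machine, emitting completed valid packets (bcid, l1counter, hits) in order.
def pvPass1 (xs : List (String × List (String × Int))) (pend : PvPending) :
    List (Int × Int × List (List (String × Int))) :=
  match xs with
  | [] => []
  | (rt, rd) :: rest =>
    if rt == "" || rd == [] then pvPass1 rest pend
    else
      match pvGetKey rd "elink" with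
      | none => pvPass1 rest pend
      | some el =>
        if rt == "header" then
          pvPass1 rest (pend.insert el (rd, []))
        else if rt == "data" then
          pvPass1 rest
            (if pend.contains el then pend.modify el ([], []) (fun p => (p.1, p.2 ++ [rd])) else pend)
        else if rt == "trailer" then
          match pend.get? el with
          | some (hdr, hits) =>
            if hits.length > 0 then
              match pvGetKey hdr "bcid" with
              | none => pvPass1 rest (pend.erase el)
              | some b =>
                (b, (pvGetKey hdr "l1counter").getD 0, hits) :: pvPass1 rest (pend.erase el)
            else
              pvPass1 rest (pend.erase el)
          | none => pvPass1 rest pend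
        else pvPass1 rest pend

-- Pass 2 per-hit appends (same ten .get() calls as Source B's inner loop).
def pvEmitB (evt cur l1a : Int) (c : PvCols) (h : List (String × Int)) : PvCols :=
  { evt := c.evt ++ [evt], bcid := c.bcid ++ [cur], l1a := c.l1a ++ [l1a],
    ea := c.ea ++ [(pvGetKey h "ea").getD 0], row := c.row ++ [(pvGetKey h "row_id").getD 0],
    col := c.col ++ [(pvGetKey h "col_id").getD 0], toa := c.toa ++ [(pvGetKey h "toa").getD 0],
    tot := c.tot ++ [(pvGetKey h "tot").getD 0], cal := c.cal ++ [(pvGetKey h "cal").getD 0],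
    elink := c.elink ++ [(pvGetKey h "elink").getD 0] }

def pvPass2 (ps : List (Int × Int × List (List (String × Int)))) (evt cur : Int) (cols : PvCols) : PvCols :=
  match ps with
  | [] => cols
  | (b, l1a, hits) :: rest =>
    let evt' := if b != cur then evt + 1 else evt
    let cur' := if b != cur then b else cur
    pvPass2 rest evt' cur' (hits.foldl (pvEmitB evt' cur' l1a) cols)

def build_events_sequentially_alt (unpacked_data : List (String × (List (String × Int)))) : List (String × List Int) :=
  (pvPass2 (pvPass1 unpacked_data PySem.Dict.empty) (-1) (-1) PvCols.init).toOut

-- ===== PRECONDITION & SPEC =====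
-- A is total; no Pre_. Note: Python appends None when a hit field or l1counter is missing; both
-- Pythons produce the identical value there, and both ports render those (rare) None cells as 0.
def Spec_build_events_sequentially (unpacked_data : List (String × (List (String × Int)))) (out : List (String × List Int)) : Prop := out = build_events_sequentially_alt unpacked_data
instance (unpacked_data : List (String × (List (String × Int)))) (out : List (String × List Int)) : Decidable (Spec_build_events_sequentially unpacked_data out) := by unfold Spec_build_events_sequentially; infer_instance

-- ===== CLAIM (what is proved, stated in full; the proofs are below) =====
def Claim_equal_build_events_sequentially : Prop := ∀ (unpacked_data : List (String × (List (String × Int)))), Dom_build_events_sequentially unpacked_data → Spec_build_events_sequentially unpacked_data (build_events_sequentially unpacked_data)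

-- ===== LEMMAS AND PROOFS =====
theorem pvLoopA_eq_passes (xs : List (String × List (String × Int))) :
    ∀ (pend : PvPending) (evt cur : Int) (cols : PvCols),
      pvLoopA xs pend evt cur cols = pvPass2 (pvPass1 xs pend) evt cur cols := by
  induction xs with
  | nil => intro pend evt cur cols; simp [pvLoopA, pvPass1, pvPass2]
  | cons x rest ih =>
    intro pend evt cur cols
    obtain ⟨rt, rd⟩ := x
    rw [pvLoopA, pvPass1]
    by_cases h0 : (rt == "" || rd == []) = true
    · simp only [h0, if_true]; exact ih _ _ _ _
    · simp only [h0]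
      cases hel : pvGetKey rd "elink" with
      | none => exact ih _ _ _ _
      | some el =>
        by_cases hh : (rt == "header") = true
        · simp only [hh, if_true]; exact ih _ _ _ _
        · simp only [hh]
          by_cases hd : (rt == "data") = true
          · simp only [hd, if_true]; exact ih _ _ _ _
          · simp only [hd]
            by_cases ht : (rt == "trailer") = true
            · simp only [ht, if_true]
              cases hp : pend.get? el with
              | none => exact ih _ _ _ _
              | some pkt =>
                obtain ⟨hdr, hits⟩ := pkt
                by_cases hl : (hits.length > 0)
                · simp only [hl, if_true]
                  cases hb : pvGetKey hdr "bcid" with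
                  | none => exact ih _ _ _ _
                  | some b =>
                    rw [pvPass2.eq_def]
                    exact ih _ _ _ _
                · simp only [hl, if_false]; exact ih _ _ _ _
            · simp only [ht]; exact ih _ _ _ _

-- ===== VERDICT (by name: the statement is the Claim_ definition above) =====
theorem build_events_sequentially_spec : Claim_equal_build_events_sequentially := by
  intro ud _
  unfold Spec_build_events_sequentially build_events_sequentially build_events_sequentially_alt
  rw [pvLoopA_eq_passes]
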